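-- pv_equiv track=rewrite | github.com/aaronlmathis/Public | leetcode/Python3/155_Medium_Min_Stack.py | execute_operations
-- ===== SOURCE A (Python) =====
-- class MinStack:
--
--     def __init__(self):
--         self.items = []
--         self.minStack = []
--
--
--     def push(self, val: int) -> None:
--         self.items.append(val)
--         if not self.minStack or val <= self.minStack[-1]:
--             self.minStack.append(val)
--
--     def pop(self) -> None:
--           if self.items.pop() == self.minStack[-1]:
--             self.minStack.pop()
--
--
--     def top(self) -> int:
--         return self.items[-1]
--
--     def getMin(self) -> int:
--         return self.minStack[-1]
--
-- def execute_operations(operations, values):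
--     obj = None
--     results = []
--     for op, val in zip(operations, values):
--         if op == "MinStack":
--             obj = MinStack()  # This will call your MinStack implementation
--             results.append(None)
--         elif op == "push":
--             obj.push(val[0])
--             results.append(None)
--         elif op == "pop":
--             obj.pop()
--             results.append(None)
--         elif op == "top":
--             results.append(obj.top())
--         elif op == "getMin":
--             results.append(obj.getMin())
--     return results
-- ===== SOURCE B (Python) =====
-- def execute_operations(operations, values):
--     # no class, no auxiliary min-stack: one plain list; getMin scans it with min()
--     stack = None
--     out = []
--     for op, val in zip(operations, values):
--         if op == "MinStack":
--             stack = []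
--             out.append(None)
--         elif op == "push":
--             stack.append(val[0])
--             out.append(None)
--         elif op == "pop":
--             stack.pop()
--             out.append(None)
--         elif op == "top":
--             out.append(stack[-1])
--         elif op == "getMin":
--             out.append(min(stack))
--     return out
-- ===== Notes on version B (the rewrite author's own statement) =====
-- stated objective: simpler
-- what changed: Drops the MinStack class and its auxiliary min-stack entirely: B keeps one plain list and computes getMin by scanning it with min(), making getMin O(n) instead of O(1) but removing all bookkeeping.
import Mathlib
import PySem

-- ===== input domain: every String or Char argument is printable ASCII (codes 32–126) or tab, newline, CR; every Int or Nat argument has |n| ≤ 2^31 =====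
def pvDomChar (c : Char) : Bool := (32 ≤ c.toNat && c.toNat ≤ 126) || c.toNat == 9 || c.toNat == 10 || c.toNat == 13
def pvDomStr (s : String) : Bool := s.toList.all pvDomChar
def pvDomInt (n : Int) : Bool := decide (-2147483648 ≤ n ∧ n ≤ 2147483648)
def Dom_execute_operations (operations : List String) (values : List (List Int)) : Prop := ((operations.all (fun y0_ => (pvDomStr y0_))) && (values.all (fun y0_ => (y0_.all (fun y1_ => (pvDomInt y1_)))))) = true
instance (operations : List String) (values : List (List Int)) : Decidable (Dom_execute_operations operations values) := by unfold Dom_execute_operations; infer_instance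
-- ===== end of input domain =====

-- B drops the MinStack class and its auxiliary min-stack: one plain list, getMin = min(stack).
-- Equivalence of the return value on the inputs where A raises no exception (Pre_ below).

-- ===== PORT A =====
-- A's MinStack state: (items, minStack); Lean list HEAD = Python list END (append/[-1]/pop
-- all act on that end, so cons/head/tail transliterate them exactly).
-- Loop over zip(operations, values), accumulating results in reverse.
def pvA_loop : List (String × List Int) → Option (List Int × List Int) → List (Option Int) → List (Option Int)
  | [], _, res => res.reverse
  | (op, val) :: rest, obj, res =>
    if op = "MinStack" then
      pvA_loop rest (some ([], [])) (none :: res)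
    else if op = "push" then
      match obj with
      | some (it, ms) =>
          let v := val.headD 0    -- val[0]; Pre_ excludes empty val here
          pvA_loop rest (some (v :: it, if ms.isEmpty ∨ v ≤ ms.headD 0 then v :: ms else ms)) (none :: res)
      | none => pvA_loop rest obj (none :: res)   -- Python raises (obj is None); excluded by Pre_
    else if op = "pop" then
      match obj with
      | some (it, ms) =>
          pvA_loop rest (some (it.tail, if it.headD 0 = ms.headD 0 then ms.tail else ms)) (none :: res)
      | none => pvA_loop rest obj (none :: res)   -- Python raises; excluded by Pre_
    else if op = "top" then
      match obj with
      | some (it, _) => pvA_loop rest obj (some (it.headD 0) :: res)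
      | none => pvA_loop rest obj (none :: res)   -- Python raises; excluded by Pre_
    else if op = "getMin" then
      match obj with
      | some (_, ms) => pvA_loop rest obj (some (ms.headD 0) :: res)
      | none => pvA_loop rest obj (none :: res)   -- Python raises; excluded by Pre_
    else pvA_loop rest obj res

def execute_operations (operations : List String) (values : List (List Int)) : List (Option Int) :=
  pvA_loop (operations.zip values) none []

-- ===== PORT B =====
-- B's state: just the plain stack (head = Python list end) paired with the reversed results;
-- the dispatch is a single fold step. getMin is min(stack) = PySem.List.min? with identity key.
def pvB_step (st : Option (List Int) × List (Option Int)) (p : String × List Int) :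
    Option (List Int) × List (Option Int) :=
  if p.1 = "MinStack" then (some [], none :: st.2)
  else if p.1 = "push" then (st.1.map (fun s => p.2.headD 0 :: s), none :: st.2)
  else if p.1 = "pop" then (st.1.map List.tail, none :: st.2)
  else if p.1 = "top" then (st.1, (st.1.bind List.head?) :: st.2)
       -- stack[-1]; Pre_ excludes the empty stack, where Python raises and head? is none
  else if p.1 = "getMin" then (st.1, (st.1.bind (fun s => PySem.List.min? s (fun x => x))) :: st.2)
       -- min(stack); Pre_ excludes the empty stack, where Python raises and min? is none
  else st

def execute_operations_alt (operations : List String) (values : List (List Int)) : List (Option Int) :=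
  (((operations.zip values).foldl pvB_step (none, [])).2).reverse

-- ===== PRECONDITION & SPEC =====
-- Shape check on the operation sequence only (no object yet / empty-stack access / empty value
-- list make Python raise): tracks whether a MinStack exists and the current stack depth.
def pvOk : Bool → Nat → List (String × List Int) → Bool
  | _, _, [] => true
  | init, d, (op, val) :: rest =>
    if op = "MinStack" then pvOk true 0 rest
    else if op = "push" then init && !val.isEmpty && pvOk init (d + 1) rest
    else if op = "pop" then init && decide (0 < d) && pvOk init (d - 1) rest
    else if op = "top" ∨ op = "getMin" then init && decide (0 < d) && pvOk init d rest
    else pvOk init d rest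

-- Pre_ excludes exactly the inputs on which Python A raises (AttributeError on a missing
-- MinStack object, IndexError on an empty stack or empty value list for push).
def Pre_execute_operations (operations : List String) (values : List (List Int)) : Prop :=
  pvOk false 0 (operations.zip values) = true
instance (operations : List String) (values : List (List Int)) : Decidable (Pre_execute_operations operations values) := by unfold Pre_execute_operations; infer_instance

def pvWitness_execute_operations : List String × List (List Int) :=
  (["MinStack", "push", "push", "getMin", "pop", "top"], [[], [-2], [0], [], [], []])

def Spec_execute_operations (operations : List String) (values : List (List Int)) (out : List (Option Int)) : Prop := out = execute_operations_alt operations values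
instance (operations : List String) (values : List (List Int)) (out : List (Option Int)) : Decidable (Spec_execute_operations operations values out) := by unfold Spec_execute_operations; infer_instance

-- ===== CLAIM =====
def Claim_equal_execute_operations : Prop := ∀ (operations : List String) (values : List (List Int)), Dom_execute_operations operations values → Pre_execute_operations operations values → Spec_execute_operations operations values (execute_operations operations values)

-- ===== LEMMAS AND PROOFS =====

-- A's minStack as a function of its items list (exactly A's push condition)
def pvF : List Int → List Int
  | [] => []
  | v :: t => if (pvF t).isEmpty ∨ v ≤ (pvF t).headD 0 then v :: pvF t else pvF t

lemma pvF_ne_nil : ∀ t : List Int, t ≠ [] → pvF t ≠ [] := by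
  intro t ht
  match t with
  | v :: t' =>
    unfold pvF
    split
    · simp
    · next h =>
      intro he
      exact h (Or.inl (by simp [he]))

lemma pvF_cons (v : Int) (t : List Int) :
    pvF (v :: t) = if (pvF t).isEmpty ∨ v ≤ (pvF t).headD 0 then v :: pvF t else pvF t := by
  simp only [pvF]

lemma pvFoldlMin_cons : ∀ (t : List Int) (v w : Int),
    (w :: t).foldl min v = min v (t.foldl min w) := by
  intro t
  induction t with
  | nil => intro v w; simp
  | cons x t ih =>
    intro v w
    show (x :: t).foldl min (min v w) = min v ((x :: t).foldl min w)
    rw [ih (min v w) x, ih w x, min_assoc]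

-- head of A's min-stack = Python min of the items
lemma pvF_head : ∀ (t : List Int) (v : Int), (pvF (v :: t)).headD 0 = t.foldl min v := by
  intro t
  induction t with
  | nil => intro v; simp [pvF]
  | cons w t ih =>
    intro v
    rw [pvFoldlMin_cons, pvF_cons]
    split
    · next h =>
      rcases h with h | h
      · exact absurd h (by simpa using pvF_ne_nil (w :: t) (by simp))
      · rw [ih w] at h; simp [min_eq_left h]
    · next h =>
      push Not at h
      rw [ih w] at h ⊢
      exact (min_eq_right (le_of_lt h.2)).symm

-- popping preserves the pvF relation (A's pop branch computes pvF of the tail)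
lemma pvF_pop (v : Int) (t : List Int) :
    (if (v :: t).headD 0 = (pvF (v :: t)).headD 0 then (pvF (v :: t)).tail
     else pvF (v :: t)) = pvF t := by
  simp only [List.headD_cons]
  by_cases hc : (pvF t).isEmpty ∨ v ≤ (pvF t).headD 0
  · have he : pvF (v :: t) = v :: pvF t := by rw [pvF_cons, if_pos hc]
    rw [he]; simp
  · have he : pvF (v :: t) = pvF t := by rw [pvF_cons, if_neg hc]
    push Not at hc
    rw [he, if_neg (by omega)]

lemma pvRel_loop : ∀ (ps : List (String × List Int)) (obj : Option (List Int))
    (res : List (Option Int)),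
    pvOk obj.isSome (match obj with | none => 0 | some s => s.length) ps = true →
    pvA_loop ps (obj.map (fun it => (it, pvF it))) res = ((ps.foldl pvB_step (obj, res)).2).reverse := by
  intro ps
  induction ps with
  | nil => intro obj res _; cases obj <;> simp [pvA_loop]
  | cons p rest ih =>
    rintro obj res hok
    obtain ⟨op, val⟩ := p
    by_cases h1 : op = "MinStack"
    · simp only [pvOk, h1, if_pos] at hok
      simpa [pvA_loop, pvB_step, h1, pvF] using ih (some []) (none :: res) hok
    · by_cases h2 : op = "push"
      · rw [pvOk, if_neg h1, if_pos h2] at hok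
        simp only [Bool.and_eq_true] at hok
        obtain ⟨⟨hinit, -⟩, hok⟩ := hok
        rcases obj with _ | it
        · simp at hinit
        · have hF := pvF_cons (val.headD 0) it
          have hrec := ih (some (val.headD 0 :: it)) (none :: res) (by simpa using hok)
          simp only [pvA_loop, pvB_step, if_neg h1, if_pos h2, Option.map_some,
            List.foldl_cons] at hrec ⊢
          rw [← hF]
          exact hrec
      · by_cases h3 : op = "pop"
        · rw [pvOk, if_neg h1, if_neg h2, if_pos h3] at hok
          simp only [Bool.and_eq_true, decide_eq_true_eq] at hok
          obtain ⟨⟨hinit, hd⟩, hok⟩ := hok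
          rcases obj with _ | it
          · simp at hinit
          · rcases it with _ | ⟨v, t⟩
            · simp at hd
            · have hrec := ih (some t) (none :: res) (by simpa using hok)
              simp only [pvA_loop, pvB_step, if_neg h1, if_neg h2, if_pos h3,
                Option.map_some, List.foldl_cons, List.tail_cons] at hrec ⊢
              rw [pvF_pop v t]
              exact hrec
        · by_cases h4 : op = "top"
          · rw [pvOk, if_neg h1, if_neg h2, if_neg h3, if_pos (Or.inl h4)] at hok
            simp only [Bool.and_eq_true, decide_eq_true_eq] at hok
            obtain ⟨⟨hinit, hd⟩, hok⟩ := hok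
            rcases obj with _ | it
            · simp at hinit
            · rcases it with _ | ⟨v, t⟩
              · simp at hd
              · have hrec := ih (some (v :: t)) (some v :: res) (by simpa using hok)
                simp only [pvA_loop, pvB_step, if_neg h1, if_neg h2, if_neg h3, if_pos h4,
                  Option.map_some, List.foldl_cons, Option.bind_some, List.head?_cons,
                  List.headD_cons] at hrec ⊢
                exact hrec
          · by_cases h5 : op = "getMin"
            · rw [pvOk, if_neg h1, if_neg h2, if_neg h3, if_pos (Or.inr h5)] at hok
              simp only [Bool.and_eq_true, decide_eq_true_eq] at hok
              obtain ⟨⟨hinit, hd⟩, hok⟩ := hok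
              rcases obj with _ | it
              · simp at hinit
              · rcases it with _ | ⟨v, t⟩
                · simp at hd
                · have hrec := ih (some (v :: t)) (some (t.foldl min v) :: res)
                    (by simpa using hok)
                  simp only [pvA_loop, pvB_step, if_neg h1, if_neg h2, if_neg h3, if_neg h4,
                    if_pos h5, Option.map_some, List.foldl_cons, Option.bind_some] at hrec ⊢
                  rw [PySem.List.min?_id_cons, pvF_head]
                  exact hrec
            · rw [pvOk, if_neg h1, if_neg h2, if_neg h3,
                if_neg (by rintro (h | h); exacts [h4 h, h5 h])] at hok
              have hrec := ih obj res hok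
              rcases obj with _ | it <;>
                simpa only [pvA_loop, pvB_step, if_neg h1, if_neg h2, if_neg h3, if_neg h4,
                  if_neg h5, Option.map_none, Option.map_some, List.foldl_cons] using hrec

-- ===== VERDICT =====
theorem execute_operations_spec : Claim_equal_execute_operations := by
  intro operations values _ hpre
  unfold Spec_execute_operations execute_operations execute_operations_alt
  have := pvRel_loop (operations.zip values) none [] (by simpa using hpre)
  simpa using this
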